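-- pv_equiv track=rewrite | github.com/KevinMendieta/programming-problems | CodeChef/python/ALTARAY.py | solve
-- ===== SOURCE A (Python) =====
-- def alt_subarray_iterative(T, array):
--   memory = [0] * T
--   for i in range(T - 1, -1, -1):
--     if i + 1 < T:
--       if (array[i] < 0 and array[i + 1] > 0) or (array[i] > 0 and array[i + 1] < 0):
--         memory[i] = 1 + memory[i + 1]
--       else:
--         memory[i] = 1
--     else:
--       memory[i] = 1
--   return memory
--
-- def solve(T, array):
--   alt_subarray = alt_subarray_iterative(T, array)
--
--   string = ''
--   for i in range(T):
--     if i + 1 < T: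
--       string += str(alt_subarray[i]) + ' '
--     else:
--       string += str(alt_subarray[i])
--   return string
-- ===== SOURCE B (Python) =====
-- def solve(T, array):
--     # Forward run-detection: find each maximal strictly-alternating-sign run,
--     # append its countdown of remaining lengths, then join once.
--     n = T if T > 0 else 0
--     memory = []
--     i = 0
--     while i < n:
--         j = i
--         while j + 1 < n and ((array[j] < 0 and array[j + 1] > 0) or (array[j] > 0 and array[j + 1] < 0)):
--             j += 1
--         memory.extend(range(j + 1 - i, 0, -1))
--         i = j + 1
--     return ' '.join(map(str, memory))
-- ===== Notes on version B (the rewrite author's own statement) =====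
-- stated objective: alternative
-- what changed: Replaces the backward neighbor DP (memory[i] = 1 + memory[i+1]) plus quadratic string += loop with a forward pass that detects each maximal alternating-sign run once and appends its countdown range(len,0,-1), finishing with a single ' '.join.
import Mathlib
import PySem

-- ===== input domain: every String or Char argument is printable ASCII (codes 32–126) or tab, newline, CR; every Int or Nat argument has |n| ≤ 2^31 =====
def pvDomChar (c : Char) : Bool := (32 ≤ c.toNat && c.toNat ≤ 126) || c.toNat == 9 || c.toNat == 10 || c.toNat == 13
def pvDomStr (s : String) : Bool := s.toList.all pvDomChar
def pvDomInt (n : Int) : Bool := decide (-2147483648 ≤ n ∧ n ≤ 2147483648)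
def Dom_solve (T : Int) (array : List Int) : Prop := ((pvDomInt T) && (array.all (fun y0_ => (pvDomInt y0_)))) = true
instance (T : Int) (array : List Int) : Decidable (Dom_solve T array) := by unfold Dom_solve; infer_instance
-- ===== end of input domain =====

-- B replaces A's backward neighbor DP + quadratic string concatenation by a forward
-- maximal-run detection pass that appends countdown ranges, joined once (objective: alternative).

-- ===== PORT A =====
-- string accumulation is ported on List Char (exact); str(n) is PySem.Int.toChars
def alt_subarray_iterative (T : Int) (array : List Int) : List Int :=
  let memory := List.replicate T.toNat (0 : Int)
  (PySem.List.pyRange (T - 1) (-1) (-1)).foldl (fun memory i =>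
    if i + 1 < T then
      if (PySem.List.pyGetD array i 0 < 0 ∧ PySem.List.pyGetD array (i + 1) 0 > 0) ∨
         (PySem.List.pyGetD array i 0 > 0 ∧ PySem.List.pyGetD array (i + 1) 0 < 0) then
        PySem.List.pySetD memory i (1 + PySem.List.pyGetD memory (i + 1) 0)
      else
        PySem.List.pySetD memory i 1
    else
      PySem.List.pySetD memory i 1) memory

def solve (T : Int) (array : List Int) : String :=
  let alt_subarray := alt_subarray_iterative T array
  String.ofList ((PySem.List.pyRange 0 T 1).foldl (fun s i =>
    if i + 1 < T then
      s ++ PySem.Int.toChars (PySem.List.pyGetD alt_subarray i 0) ++ [' ']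
    else
      s ++ PySem.Int.toChars (PySem.List.pyGetD alt_subarray i 0)) ([] : List Char))

-- ===== PORT B =====
-- the strict alternating-sign test of Source B's inner while condition
abbrev altP (array : List Int) (j : Nat) : Prop :=
  (array.getD j 0 < 0 ∧ array.getD (j + 1) 0 > 0) ∨
  (array.getD j 0 > 0 ∧ array.getD (j + 1) 0 < 0)

-- inner while loop: advance j while the next element strictly alternates
def runEnd (array : List Int) (n j : Nat) : Nat :=
  if h : j + 1 < n ∧ altP array j then runEnd array n (j + 1) else j
termination_by n - j
decreasing_by omega

theorem runEnd_ge (array : List Int) (n j : Nat) : j ≤ runEnd array n j := by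
  unfold runEnd
  split_ifs with _h
  · have := runEnd_ge array n (j + 1); omega
  · exact Nat.le_refl j
termination_by n - j
decreasing_by omega

-- outer while loop: per maximal run, append the countdown range(j+1-i, 0, -1)
def runsB (array : List Int) (n i : Nat) : List Int :=
  if _h : i < n then
    let j := runEnd array n i
    PySem.List.pyRange ((j : Int) + 1 - (i : Int)) 0 (-1) ++ runsB array n (j + 1)
  else []
termination_by n - i
decreasing_by have := runEnd_ge array n i; omega

def solve_alt (T : Int) (array : List Int) : String :=
  let n := if 0 < T then T.toNat else 0
  let memory := runsB array n 0
  PySem.Str.join " " (memory.map PySem.Int.toStr)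

-- ===== PRECONDITION & SPEC =====
-- Pre_ excludes exactly the inputs with T > len(array), on which A raises IndexError.
def Pre_solve (T : Int) (array : List Int) : Prop := T ≤ (array.length : Int)
instance (T : Int) (array : List Int) : Decidable (Pre_solve T array) := by
  unfold Pre_solve; infer_instance

def pvWitness_solve : Int × List Int := (4, [1, -2, 3, 3])

def Spec_solve (T : Int) (array : List Int) (out : String) : Prop := out = solve_alt T array
instance (T : Int) (array : List Int) (out : String) : Decidable (Spec_solve T array out) := by
  unfold Spec_solve; infer_instance

-- ===== CLAIM (what is proved, stated in full; the proofs are below) =====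
def Claim_equal_solve : Prop := ∀ (T : Int) (array : List Int), Dom_solve T array → Pre_solve T array → Spec_solve T array (solve T array)

-- ===== LEMMAS AND PROOFS =====

-- mathematical description of the alternating-run length at index i (0-based, bound n)
def mA (array : List Int) (n i : Nat) : Int :=
  if i + 1 < n then (if altP array i then 1 + mA array n (i + 1) else 1) else 1
termination_by n - i

theorem runEnd_stop (array : List Int) (n j : Nat) :
    ¬ (runEnd array n j + 1 < n ∧ altP array (runEnd array n j)) := by
  unfold runEnd
  split_ifs with h
  · exact runEnd_stop array n (j + 1)
  · exact h
termination_by n - j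
decreasing_by omega

theorem runEnd_alt (array : List Int) (n j : Nat) :
    ∀ k, j ≤ k → k < runEnd array n j → (k + 1 < n ∧ altP array k) := by
  unfold runEnd
  split_ifs with h
  · intro k hjk hk
    rcases Nat.eq_or_lt_of_le hjk with rfl | hlt
    · exact h
    · exact runEnd_alt array n (j + 1) k hlt hk
  · intro k hjk hk; omega
termination_by n - j
decreasing_by omega

theorem runEnd_lt (array : List Int) (n j : Nat) (hj : j < n) : runEnd array n j < n := by
  unfold runEnd
  split_ifs with h
  · exact runEnd_lt array n (j + 1) h.1
  · exact hj
termination_by n - j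
decreasing_by omega

-- the value of mA across one maximal run: mA k = j + 1 - k for i ≤ k ≤ j = runEnd i
theorem mA_run (array : List Int) (n : Nat) (j : Nat) (hstop : ¬ (j + 1 < n ∧ altP array j))
    (d : Nat) : ∀ k, k + d = j → (∀ m, k ≤ m → m < j → (m + 1 < n ∧ altP array m)) →
    mA array n k = (j : Int) + 1 - (k : Int) := by
  induction d with
  | zero =>
    intro k hk _
    subst hk
    unfold mA
    split_ifs with h1 h2
    · exact absurd ⟨h1, h2⟩ hstop
    · omega
    · omega
  | succ d ih =>
    intro k hk halt
    have hkj : k < j := by omega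
    have hk1 : k + 1 < n ∧ altP array k := halt k (Nat.le_refl k) hkj
    have hrec : mA array n (k + 1) = (j : Int) + 1 - ((k : Int) + 1) := by
      have := ih (k + 1) (by omega) (fun m hm hmj => halt m (by omega) hmj)
      push_cast at this
      omega
    unfold mA
    rw [if_pos hk1.1, if_pos hk1.2, hrec]
    ring

-- the countdown range is exactly the run's mA values
theorem countdown_eq (a b : Nat) (hab : a ≤ b) :
    PySem.List.pyRange ((b : Int) + 1 - (a : Int)) 0 (-1)
      = (List.range (b + 1 - a)).map (fun (t : Nat) => (b : Int) + 1 - (a : Int) - (t : Int)) := by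
  rw [PySem.List.pyRange_neg_one]
  have h1 : (((b : Int) + 1 - (a : Int)) - 0).toNat = b + 1 - a := by omega
  rw [h1]

-- B's run list equals the pointwise mA table
theorem runsB_eq (array : List Int) (n i : Nat) (hi : i ≤ n) :
    runsB array n i = (List.range (n - i)).map (fun t => mA array n (i + t)) := by
  by_cases hin : i < n
  · have hjlt := runEnd_lt array n i hin
    have hjge := runEnd_ge array n i
    have hstop := runEnd_stop array n i
    have halt := runEnd_alt array n i
    rw [runsB, dif_pos hin]
    change PySem.List.pyRange ((runEnd array n i : Int) + 1 - (i : Int)) 0 (-1)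
        ++ runsB array n (runEnd array n i + 1) = _
    set j := runEnd array n i with hj
    have hrec := runsB_eq array n (j + 1) (by omega)
    rw [hrec, countdown_eq i j hjge]
    have hsplit : n - i = (j + 1 - i) + (n - (j + 1)) := by omega
    rw [hsplit, List.range_add, List.map_append]
    congr 1
    · apply List.map_congr_left
      intro t ht
      rw [List.mem_range] at ht
      have hval := mA_run array n j hstop (j - (i + t)) (i + t) (by omega)
        (fun m hm hmj => halt m (by omega) hmj)
      rw [hval]
      push_cast
      ring
    · rw [List.map_map]
      apply List.map_congr_left
      intro t _
      simp only [Function.comp_apply]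
      congr 1
      omega
  · rw [runsB, dif_neg hin]
    have h0 : n - i = 0 := by omega
    rw [h0]
    simp
termination_by n - i
decreasing_by have := runEnd_ge array n i; omega

-- A's backward loop invariant
theorem loopA_inv (array : List Int) (n : Nat) : ∀ (j : Nat), j ≤ n →
    ∀ (mem : List Int), mem.length = n →
    (∀ m : Nat, j ≤ m → m < n → mem.getD m 0 = mA array n m) →
    ((PySem.List.pyRange ((j : Int) - 1) (-1) (-1)).foldl (fun memory i =>
      if i + 1 < (n : Int) then
        if (PySem.List.pyGetD array i 0 < 0 ∧ PySem.List.pyGetD array (i + 1) 0 > 0) ∨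
           (PySem.List.pyGetD array i 0 > 0 ∧ PySem.List.pyGetD array (i + 1) 0 < 0) then
          PySem.List.pySetD memory i (1 + PySem.List.pyGetD memory (i + 1) 0)
        else
          PySem.List.pySetD memory i 1
      else
        PySem.List.pySetD memory i 1) mem)
    = (List.range n).map (fun m => mA array n m) := by
  intro j
  induction j with
  | zero =>
    intro _ mem hlen hinv
    rw [PySem.List.pyRange_neg_one_eq_nil (by omega)]
    simp only [List.foldl_nil]
    apply List.ext_getElem
    · simp [hlen]
    · intro m h1 h2
      have hm : m < n := by simpa [hlen] using h1
      have := hinv m (Nat.zero_le m) hm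
      rw [List.getD_eq_getElem mem 0 h1] at this
      rw [this]
      simp
  | succ j ih =>
    intro hjn mem hlen hinv
    have hcons : ((j + 1 : Nat) : Int) - 1 = (j : Int) := by push_cast; ring
    rw [hcons, PySem.List.pyRange_neg_one_cons (by omega), List.foldl_cons]
    have hjlt : j < n := by omega
    have hcast : ((j : Int) + 1) = ((j + 1 : Nat) : Int) := by push_cast; ring
    simp only [hcast, Nat.cast_lt, PySem.List.pyGetD_natCast, PySem.List.pySetD_natCast]
    have happly : ∀ v : Int, v = mA array n j →
        List.foldl (fun memory i =>
          if i + 1 < (n : Int) then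
            if (PySem.List.pyGetD array i 0 < 0 ∧ PySem.List.pyGetD array (i + 1) 0 > 0) ∨
               (PySem.List.pyGetD array i 0 > 0 ∧ PySem.List.pyGetD array (i + 1) 0 < 0) then
              PySem.List.pySetD memory i (1 + PySem.List.pyGetD memory (i + 1) 0)
            else PySem.List.pySetD memory i 1
          else PySem.List.pySetD memory i 1) (mem.set j v)
          (PySem.List.pyRange ((j : Int) - 1) (-1) (-1))
          = (List.range n).map (fun m => mA array n m) := by
      intro v hv
      apply ih (by omega) (mem.set j v) (by simp [hlen])
      intro m hm1 hm2
      rcases Nat.eq_or_lt_of_le hm1 with rfl | hmj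
      · rw [hv, List.getD_eq_getElem _ _ (by simp [hlen]; omega),
            List.getElem_set_self (by simp [hlen]; omega)]
      · rw [List.getD_eq_getElem?_getD, List.getElem?_set_ne (by omega),
            ← List.getD_eq_getElem?_getD]
        exact hinv m (by omega) hm2
    by_cases hb : j + 1 < n
    · rw [if_pos hb]
      by_cases ha : altP array j
      · rw [if_pos ha, hinv (j + 1) (Nat.le_refl _) hb]
        exact happly _ (by conv_rhs => rw [mA, if_pos hb, if_pos ha])
      · rw [if_neg ha]
        exact happly _ (by conv_rhs => rw [mA, if_pos hb, if_neg ha])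
    · rw [if_neg hb]
      exact happly _ (by conv_rhs => rw [mA, if_neg hb])

-- A's string-building loop equals charsA of the list
def charsA : List Int → List Char
  | [] => []
  | [x] => PySem.Int.toChars x
  | x :: y :: r => PySem.Int.toChars x ++ ' ' :: charsA (y :: r)

theorem charsA_cons (x : Int) (r : List Int) (hr : r ≠ []) :
    charsA (x :: r) = PySem.Int.toChars x ++ ' ' :: charsA r := by
  cases r with
  | nil => exact absurd rfl hr
  | cons y r' => rfl

theorem join_eq_charsA (xs : List Int) :
    PySem.Chars.join [' '] (xs.map PySem.Int.toChars) = charsA xs := by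
  induction xs with
  | nil => simp [PySem.Chars.join_nil, charsA]
  | cons x r ih =>
    cases r with
    | nil => simp [PySem.Chars.join_singleton, charsA]
    | cons y r' =>
      rw [List.map_cons, List.map_cons, PySem.Chars.join_cons_cons, ← List.map_cons, ih,
          charsA_cons x (y :: r') (by simp)]
      simp

theorem strA (xs : List Int) (a : Nat) (acc : List Char) (ha : a ≤ xs.length) :
    (PySem.List.pyRange (a : Int) (xs.length : Int) 1).foldl (fun s i =>
      if i + 1 < (xs.length : Int) then
        s ++ PySem.Int.toChars (PySem.List.pyGetD xs i 0) ++ [' ']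
      else
        s ++ PySem.Int.toChars (PySem.List.pyGetD xs i 0)) acc
    = acc ++ charsA (xs.drop a) := by
  by_cases hlt : a < xs.length
  · rw [PySem.List.pyRange_one_cons (by exact_mod_cast hlt), List.foldl_cons]
    have hcast : ((a : Int) + 1) = ((a + 1 : Nat) : Int) := by push_cast; ring
    simp only [hcast, Nat.cast_lt, PySem.List.pyGetD_natCast]
    have hdrop : xs.drop a = xs.getD a 0 :: xs.drop (a + 1) := by
      rw [List.getD_eq_getElem _ _ hlt]
      exact (List.getElem_cons_drop hlt).symm
    by_cases hb : a + 1 < xs.length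
    · rw [if_pos hb, strA xs (a + 1) _ (by omega), hdrop,
          charsA_cons _ _ (by rw [Ne, List.drop_eq_nil_iff]; omega)]
      simp
    · rw [if_neg hb, strA xs (a + 1) _ (by omega), hdrop,
          List.drop_eq_nil_iff.mpr (by omega)]
      simp [charsA]
  · rw [PySem.List.pyRange_one_eq_nil (by exact_mod_cast (by omega : xs.length ≤ a))]
    rw [List.drop_eq_nil_iff.mpr (by omega)]
    simp [charsA]
termination_by xs.length - a

theorem solve_spec : Claim_equal_solve := by
  unfold Claim_equal_solve
  intro T array _ hpre
  unfold Pre_solve at hpre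
  unfold Spec_solve
  simp only [solve, solve_alt, alt_subarray_iterative]
  by_cases hT : 0 < T
  · rw [if_pos hT]
    have hTn : T = (T.toNat : Int) := by omega
    set n := T.toNat
    have hnpos : 0 < n := by omega
    have hlen : n ≤ array.length := by omega
    rw [hTn]
    have hmem := loopA_inv array n n (Nat.le_refl n)
      (List.replicate n (0 : Int)) (by simp)
      (fun m hm1 hm2 => absurd hm2 (by omega))
    rw [hmem]
    set xs := (List.range n).map (fun m => mA array n m) with hxs
    have hxslen : xs.length = n := by simp [hxs]
    have hB : runsB array n 0 = xs := by
      rw [runsB_eq array n 0 (Nat.zero_le n), hxs]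
      simp
    rw [hB]
    have hstr := strA xs 0 [] (Nat.zero_le _)
    rw [hxslen] at hstr
    simp only [Nat.cast_zero] at hstr
    rw [hstr, List.drop_zero, List.nil_append]
    have hjoin : (PySem.Str.join " " (xs.map PySem.Int.toStr)).toList = charsA xs := by
      rw [PySem.Str.toList_join, List.map_map]
      have : (String.toList ∘ PySem.Int.toStr) = PySem.Int.toChars := by
        funext m; exact PySem.Int.toList_toStr m
      rw [this]
      exact join_eq_charsA xs
    calc String.ofList (charsA xs)
        = String.ofList (PySem.Str.join " " (xs.map PySem.Int.toStr)).toList := by rw [hjoin]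
      _ = _ := String.ofList_toList
  · rw [PySem.List.pyRange_one_eq_nil (by omega : T ≤ 0), if_neg hT]
    rw [runsB, dif_neg (show ¬(0 < 0) by omega)]
    simp only [List.foldl_nil, List.map_nil]
    have : (PySem.Str.join " " ([] : List String)).toList = [] := by
      rw [PySem.Str.toList_join]
      simp [PySem.Chars.join_nil]
    calc String.ofList ([] : List Char)
        = String.ofList (PySem.Str.join " " ([] : List String)).toList := by rw [this]
      _ = _ := String.ofList_toList
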